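-- pv_equiv track=rewrite | github.com/luizrennocosta/comp1ufrj | listas/lista1/submissions/123695883_lista1.py | questao3
-- ===== SOURCE A (Python) =====
-- def questao3(string_a,string_b):
--     qnt_letras_comuns = 0
--     for letra_string_a in string_a:
--         for letra_string_b in string_b:
--             if letra_string_a == letra_string_b:
--                 qnt_letras_comuns += 1
--                 break
--     retirar_a = len(string_a)-qnt_letras_comuns
--     retirar_b = len(string_b)-qnt_letras_comuns
--     retirar_total = retirar_a + retirar_b
--     return retirar_total
-- ===== SOURCE B (Python) =====
-- def questao3(string_a, string_b):
--     sa = sorted(string_a)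
--     sb = sorted(string_b)
--     common = 0
--     j = 0
--     for c in sa:
--         while j < len(sb) and sb[j] < c:
--             j += 1
--         if j < len(sb) and sb[j] == c:
--             common += 1
--     return len(string_a) + len(string_b) - 2 * common
-- ===== Notes on version B (the rewrite author's own statement) =====
-- stated objective: faster
-- what changed: Sorts both strings and counts the common characters with a single two-pointer merge scan (the second pointer only ever advances), replacing A's nested scan of string_b for every character of string_a.
import Mathlib
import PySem

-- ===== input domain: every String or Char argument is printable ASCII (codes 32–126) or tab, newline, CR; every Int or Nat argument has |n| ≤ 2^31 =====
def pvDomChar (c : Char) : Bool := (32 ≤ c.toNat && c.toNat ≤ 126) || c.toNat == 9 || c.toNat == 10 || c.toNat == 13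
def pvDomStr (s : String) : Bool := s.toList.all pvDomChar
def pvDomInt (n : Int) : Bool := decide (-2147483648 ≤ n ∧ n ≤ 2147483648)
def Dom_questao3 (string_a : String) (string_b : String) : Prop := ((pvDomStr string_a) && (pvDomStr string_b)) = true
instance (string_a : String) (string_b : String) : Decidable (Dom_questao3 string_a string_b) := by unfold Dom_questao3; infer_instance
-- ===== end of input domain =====

-- B sorts both strings and counts common characters with a single two-pointer merge scan
-- instead of A's nested scan of string_b for every character of string_a (objective: faster).

-- ===== PORT A =====
-- inner 'for letra_string_b in string_b: if ==: count += 1; break' loop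
def innerA (c : Char) : List Char → Int → Int
  | [], acc => acc
  | x :: r, acc => if c == x then acc + 1 else innerA c r acc

def questao3 (string_a : String) (string_b : String) : Int :=
  let qnt_letras_comuns := string_a.toList.foldl (fun acc c => innerA c string_b.toList acc) 0
  let retirar_a := PySem.Str.len string_a - qnt_letras_comuns
  let retirar_b := PySem.Str.len string_b - qnt_letras_comuns
  retirar_a + retirar_b

-- ===== PORT B =====
-- 'while j < len(sb) and sb[j] < c: j += 1'
def skipB (sb : List Char) (c : Char) (j : Nat) : Nat :=
  match h : sb[j]? with
  | some x => if x < c then skipB sb c (j + 1) else j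
  | none => j
termination_by sb.length - j
decreasing_by obtain ⟨hlt, -⟩ := List.getElem?_eq_some_iff.mp h; omega

def questao3_alt (string_a : String) (string_b : String) : Int :=
  let sa := PySem.List.sorted string_a.toList (fun c => c) false
  let sb := PySem.List.sorted string_b.toList (fun c => c) false
  let res := sa.foldl (fun (st : Int × Nat) c =>
      let j := skipB sb c st.2
      (st.1 + (if sb[j]? = some c then 1 else 0), j)) (0, 0)
  PySem.Str.len string_a + PySem.Str.len string_b - 2 * res.1

-- ===== PRECONDITION & SPEC =====
def Spec_questao3 (string_a : String) (string_b : String) (out : Int) : Prop := out = questao3_alt string_a string_b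
instance (string_a : String) (string_b : String) (out : Int) : Decidable (Spec_questao3 string_a string_b out) := by unfold Spec_questao3; infer_instance

-- ===== CLAIM (what is proved, stated in full; the proofs are below) =====
def Claim_equal_questao3 : Prop := ∀ (string_a : String) (string_b : String), Dom_questao3 string_a string_b → Spec_questao3 string_a string_b (questao3 string_a string_b)

-- ===== LEMMAS AND PROOFS =====

-- A's nested loop counts the positions of `as` whose character occurs in `bs`
theorem innerA_eq (c : Char) (bs : List Char) (acc : Int) :
    innerA c bs acc = acc + (if bs.contains c then 1 else 0) := by
  induction bs with
  | nil => simp [innerA]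
  | cons x r ih =>
    by_cases h : c = x
    · simp [innerA, h]
    · rw [innerA, if_neg (by simpa using h), ih]
      simp [eq_comm, h]

theorem foldlA_eq (bs : List Char) (as : List Char) (n : Int) :
    as.foldl (fun acc c => innerA c bs acc) n = n + (as.countP (fun c => bs.contains c) : Int) := by
  induction as generalizing n with
  | nil => simp
  | cons c r ih =>
    rw [List.foldl_cons, innerA_eq, ih, List.countP_cons]
    split <;> push_cast <;> ring

-- the while-loop advances the pointer over exactly the leading elements < c of the suffix
theorem skipB_drop (sb : List Char) (c : Char) (j : Nat) :
    j ≤ skipB sb c j ∧ sb.drop (skipB sb c j) = (sb.drop j).dropWhile (fun x => decide (x < c)) := by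
  fun_induction skipB sb c j with
  | case1 j x h hlt ih =>
    refine ⟨le_trans (by omega) ih.1, ?_⟩
    have hj : j < sb.length := (List.getElem?_eq_some_iff.mp h).1
    have hcons : sb.drop j = sb[j] :: sb.drop (j + 1) := List.drop_eq_getElem_cons hj
    have hx : sb[j] = x := (List.getElem?_eq_some_iff.mp h).2
    rw [ih.2, hcons]
    simp [hx, hlt]
  | case2 j x h hlt =>
    have hj : j < sb.length := (List.getElem?_eq_some_iff.mp h).1
    have hcons : sb.drop j = sb[j] :: sb.drop (j + 1) := List.drop_eq_getElem_cons hj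
    have hx : sb[j] = x := (List.getElem?_eq_some_iff.mp h).2
    rw [hcons]
    simp [hx, hlt]
  | case3 j h =>
    have hj : sb.length ≤ j := by simpa using List.getElem?_eq_none_iff.mp h
    simp [List.drop_eq_nil_of_le hj]

-- membership is preserved by dropWhile (x < c) for any target ≥ c
theorem mem_dropWhile_of_ge (l : List Char) (c d : Char) (hcd : c ≤ d) :
    (d ∈ l.dropWhile (fun x => decide (x < c))) ↔ d ∈ l := by
  induction l with
  | nil => simp
  | cons x t ih =>
    by_cases h : x < c
    · have hne : d ≠ x := by
        intro e; subst e; exact absurd (lt_of_lt_of_le h hcd) (lt_irrefl d)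
      simp [h, ih, hne]
    · simp [h]

-- in a sorted suffix, the pointed-at element equals c iff c occurs in the suffix
theorem head_dropWhile_eq_iff_mem (l : List Char) (c : Char) (hs : l.Pairwise (· ≤ ·)) :
    ((l.dropWhile (fun x => decide (x < c))).head? = some c) ↔ c ∈ l := by
  induction l with
  | nil => simp
  | cons x t ih =>
    rw [List.pairwise_cons] at hs
    by_cases h : x < c
    · have hne : c ≠ x := fun e => absurd (e ▸ h) (lt_irrefl _)
      simp [h, ih hs.2, hne]
    · have hcx : c ≤ x := le_of_not_gt h
      constructor
      · intro he
        simp [h] at he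
        simp [he]
      · intro hm
        rcases List.mem_cons.mp hm with e | hmt
        · simp [e]
        · have hxc : x ≤ c := hs.1 c hmt
          have hx : x = c := le_antisymm hxc hcx
          simp [hx]

-- main loop invariant for B's fold
theorem foldB_eq (sb : List Char) (hsb : sb.Pairwise (· ≤ ·)) : ∀ (sa : List Char),
    sa.Pairwise (· ≤ ·) → ∀ (acc : Int) (j : Nat),
    (∀ d ∈ sa, (d ∈ sb ↔ d ∈ sb.drop j)) →
    (sa.foldl (fun (st : Int × Nat) c =>
        let j := skipB sb c st.2
        (st.1 + (if sb[j]? = some c then 1 else 0), j)) (acc, j)).1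
      = acc + (sa.countP (fun c => sb.contains c) : Int) := by
  intro sa
  induction sa with
  | nil => intro _ acc j _; simp
  | cons c t ih =>
    intro hsa acc j hinv
    rw [List.pairwise_cons] at hsa
    have hdropSorted : (sb.drop j).Pairwise (· ≤ ·) := hsb.sublist (List.drop_sublist _ _)
    have hd := skipB_drop sb c j
    have hhit : sb[skipB sb c j]? = some c ↔ c ∈ sb := by
      rw [← List.head?_drop, hd.2, head_dropWhile_eq_iff_mem _ _ hdropSorted]
      exact (hinv c List.mem_cons_self).symm
    have hinv' : ∀ d ∈ t, (d ∈ sb ↔ d ∈ sb.drop (skipB sb c j)) := by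
      intro d hdm
      rw [hd.2, mem_dropWhile_of_ge _ _ _ (hsa.1 d hdm)]
      exact hinv d (List.mem_cons_of_mem _ hdm)
    rw [List.foldl_cons]
    simp only []
    rw [ih hsa.2 _ _ hinv', List.countP_cons]
    have hif : (if sb[skipB sb c j]? = some c then (1 : Int) else 0)
        = (if sb.contains c then 1 else 0) := by
      by_cases hm : c ∈ sb
      · simp [hhit.mpr hm, hm]
      · rw [if_neg (fun e => hm (hhit.mp e)), if_neg (by simpa using hm)]
    rw [hif]
    by_cases hm : c ∈ sb
    · simp [hm]; ring
    · simp [hm]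

-- ===== VERDICT (by name: the statement is the Claim_ definition above) =====
theorem questao3_spec : Claim_equal_questao3 := by
  intro a b _
  unfold Spec_questao3
  simp only [questao3, questao3_alt]
  rw [foldlA_eq]
  have hsb : (PySem.List.sorted b.toList (fun c => c) false).Pairwise (· ≤ ·) :=
    PySem.List.sorted_pairwise b.toList (fun c => c)
  have hsa : (PySem.List.sorted a.toList (fun c => c) false).Pairwise (· ≤ ·) :=
    PySem.List.sorted_pairwise a.toList (fun c => c)
  rw [foldB_eq _ hsb _ hsa 0 0 (by simp)]
  have h1 : (fun c => (PySem.List.sorted b.toList (fun c => c) false).contains c)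
      = (fun c => b.toList.contains c) := by
    funext c
    simp [PySem.List.mem_sorted]
  have hc : (PySem.List.sorted a.toList (fun c => c) false).countP
        (fun c => (PySem.List.sorted b.toList (fun c => c) false).contains c)
      = a.toList.countP (fun c => b.toList.contains c) := by
    rw [h1]
    exact (PySem.List.sorted_perm a.toList (fun c => c) false).countP_eq _
  rw [hc]
  ring
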